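-- pv_equiv track=rewrite | github.com/owenkew124/TPG8813ML | target_guess.py | get_pattern
-- ===== SOURCE A (Python) =====
-- def get_pattern(password: str):
--     result = []
--     current_type = None
--     current_length = 0
--
--     for char in password:
--         if char.isalpha():
--             if current_type == 'L':
--                 current_length += 1
--             else:
--                 if current_type:
--                     result.append(current_type + str(current_length))
--                 current_type = 'L'
--                 current_length = 1
--         elif char.isdigit():
--             if current_type == 'N':
--                 current_length += 1
--             else:
--                 if current_type:
--                     result.append(current_type + str(current_length))
--                 current_type = 'N'
--                 current_length = 1
--         else:
--             if current_type == 'S':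
--                 current_length += 1
--             else:
--                 if current_type:
--                     result.append(current_type + str(current_length))
--                 current_type = 'S'
--                 current_length = 1
--
--     if current_type:
--         result.append(current_type + str(current_length))
--     return result
-- ===== SOURCE B (Python) =====
-- def get_pattern(password: str):
--     labels = ['L' if c.isalpha() else 'N' if c.isdigit() else 'S' for c in password]
--     n = len(labels)
--     cuts = [i for i in range(n) if i == 0 or labels[i] != labels[i - 1]] + [n]
--     return [labels[s] + str(e - s) for s, e in zip(cuts, cuts[1:])]
-- ===== Notes on version B (the rewrite author's own statement) =====
-- stated objective: alternative
-- what changed: Replaces A's one-pass state machine (current_type/current_length accumulator with three duplicated branches) by a staged boundary-index algorithm: map characters to class labels, compute the list of cut positions where the label changes via index comparisons, then emit one run per consecutive pair of cuts.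
import Mathlib
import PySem

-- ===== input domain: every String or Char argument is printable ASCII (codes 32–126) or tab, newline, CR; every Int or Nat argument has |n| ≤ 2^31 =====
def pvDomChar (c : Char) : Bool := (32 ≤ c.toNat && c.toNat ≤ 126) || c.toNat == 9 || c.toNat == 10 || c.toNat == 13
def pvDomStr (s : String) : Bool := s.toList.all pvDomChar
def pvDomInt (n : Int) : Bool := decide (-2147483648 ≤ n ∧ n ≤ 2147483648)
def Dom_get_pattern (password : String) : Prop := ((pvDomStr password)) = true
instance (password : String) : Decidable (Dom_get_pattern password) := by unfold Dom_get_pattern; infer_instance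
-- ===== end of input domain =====

-- B replaces A's one-pass state machine by a staged boundary-index algorithm (labels, cut positions, pair up cuts); alternative decomposition, same O(n) cost.


-- ===== PORT A =====
-- the for-loop over password with state (result, current_type, current_length); current_type = none models Python's None
def get_pattern_go : List Char → List String → Option String → Int → List String
  | [], result, current_type, current_length =>
    match current_type with
    | some t => result ++ [t ++ PySem.Int.toStr current_length]
    | none => result
  | c :: rest, result, current_type, current_length =>
    if PySem.Chars.isalpha c then
      if current_type = some "L" then
        get_pattern_go rest result current_type (current_length + 1)
      else
        get_pattern_go rest
          (match current_type with
           | some t => result ++ [t ++ PySem.Int.toStr current_length]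
           | none => result) (some "L") 1
    else if PySem.Chars.isdigit c then
      if current_type = some "N" then
        get_pattern_go rest result current_type (current_length + 1)
      else
        get_pattern_go rest
          (match current_type with
           | some t => result ++ [t ++ PySem.Int.toStr current_length]
           | none => result) (some "N") 1
    else
      if current_type = some "S" then
        get_pattern_go rest result current_type (current_length + 1)
      else
        get_pattern_go rest
          (match current_type with
           | some t => result ++ [t ++ PySem.Int.toStr current_length]
           | none => result) (some "S") 1

def get_pattern (password : String) : List String :=
  get_pattern_go password.toList [] none 0

-- ===== PORT B =====
-- 'L' if c.isalpha() else 'N' if c.isdigit() else 'S'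
def pvLabel (c : Char) : String :=
  if PySem.Chars.isalpha c then "L" else if PySem.Chars.isdigit c then "N" else "S"

-- labels; cuts = indices where the label changes (plus the sentinel n); one output per consecutive pair of cuts
def get_pattern_alt (password : String) : List String :=
  let labels := password.toList.map pvLabel
  let n := labels.length
  let cuts := ((List.range n).filter (fun i => i == 0 || labels[i]? != labels[i - 1]?)) ++ [n]
  (cuts.zip cuts.tail).map (fun p => labels.getD p.1 "" ++ PySem.Int.toStr ((p.2 : Int) - (p.1 : Int)))

-- ===== PRECONDITION & SPEC =====
def Spec_get_pattern (password : String) (out : List String) : Prop := out = get_pattern_alt password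
instance (password : String) (out : List String) : Decidable (Spec_get_pattern password out) := by unfold Spec_get_pattern; infer_instance

-- ===== CLAIM (what is proved, stated in full; the proofs are below) =====
def Claim_equal_get_pattern : Prop := ∀ (password : String), Dom_get_pattern password → Spec_get_pattern password (get_pattern password)

-- ===== LEMMAS AND PROOFS =====

-- reference run-length encoding of a label list, by element-wise recursion
def pvR : List String → List (String × Int)
  | [] => []
  | [a] => [(a, 1)]
  | a :: b :: t =>
    if a = b then
      match pvR (b :: t) with
      | (x, m) :: r => (x, m + 1) :: r
      | [] => []
    else (a, 1) :: pvR (b :: t)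

-- finishing a pending run (t, n) in front of an already-encoded tail
def pvMerge (t : String) (n : Int) : List (String × Int) → List (String × Int)
  | [] => [(t, n)]
  | (x, m) :: r => if x = t then (t, n + m) :: r else (t, n) :: (x, m) :: r

def pvFmt (rs : List (String × Int)) : List String := rs.map (fun p => p.1 ++ PySem.Int.toStr p.2)

theorem pvR_head (a : String) (ls : List String) : ∃ m r, pvR (a :: ls) = (a, m) :: r := by
  induction ls generalizing a with
  | nil => exact ⟨1, [], rfl⟩
  | cons b t ih =>
    obtain ⟨m, r, h⟩ := ih b
    by_cases hab : a = b
    · subst hab; exact ⟨m + 1, r, by simp [pvR, h]⟩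
    · exact ⟨1, pvR (b :: t), by simp [pvR, hab]⟩

theorem pvR_cons (l : String) (ls : List String) : pvR (l :: ls) = pvMerge l 1 (pvR ls) := by
  cases ls with
  | nil => rfl
  | cons b t =>
    obtain ⟨m, r, h⟩ := pvR_head b t
    by_cases hlb : l = b
    · subst hlb; simp [pvR, h, pvMerge]; ring
    · simp [pvR, h, pvMerge, hlb, Ne.symm hlb]

theorem pvMerge_merge (t : String) (n : Int) (rs : List (String × Int)) :
    pvMerge t n (pvMerge t 1 rs) = pvMerge t (n + 1) rs := by
  cases rs with
  | nil => simp [pvMerge]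
  | cons p r =>
    obtain ⟨x, m⟩ := p
    by_cases hxt : x = t
    · subst hxt; simp [pvMerge]; ring
    · simp [pvMerge, hxt]

-- the three syntactic branches of A's loop body collapse to one comparison with the label of the current char
theorem get_pattern_go_cons (c : Char) (cs : List Char) (res : List String)
    (ct : Option String) (n : Int) :
    get_pattern_go (c :: cs) res ct n =
      if ct = some (pvLabel c) then get_pattern_go cs res ct (n + 1)
      else get_pattern_go cs
        (match ct with | some t => res ++ [t ++ PySem.Int.toStr n] | none => res)
        (some (pvLabel c)) 1 := by
  by_cases ha : PySem.Chars.isalpha c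
  · simp [get_pattern_go, pvLabel, ha]
  · by_cases hd : PySem.Chars.isdigit c <;> simp [get_pattern_go, pvLabel, ha, hd]

theorem get_pattern_go_pending (cs : List Char) : ∀ (res : List String) (t : String) (n : Int),
    get_pattern_go cs res (some t) n = res ++ pvFmt (pvMerge t n (pvR (cs.map pvLabel))) := by
  induction cs with
  | nil => intro res t n; simp [get_pattern_go, pvR, pvMerge, pvFmt]
  | cons c cs ih =>
    intro res t n
    rw [get_pattern_go_cons]
    by_cases h : t = pvLabel c
    · rw [if_pos (by rw [h]), ih]
      simp only [List.map_cons, pvR_cons, ← h, pvMerge_merge]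
    · rw [if_neg (fun e => h (Option.some.inj e))]
      rw [show (match some t with | some u => res ++ [u ++ PySem.Int.toStr n] | none => res) =
            res ++ [t ++ PySem.Int.toStr n] from rfl]
      rw [ih, ← pvR_cons]
      obtain ⟨m, r, hr⟩ := pvR_head (pvLabel c) (cs.map pvLabel)
      simp [List.map_cons, hr, pvMerge, pvFmt, Ne.symm h]

theorem get_pattern_eq_R (password : String) :
    get_pattern password = pvFmt (pvR (password.toList.map pvLabel)) := by
  unfold get_pattern
  cases hcs : password.toList with
  | nil => simp [get_pattern_go, pvR, pvFmt]
  | cons c cs =>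
    rw [get_pattern_go_cons, if_neg (by simp), get_pattern_go_pending]
    simp [List.map_cons, pvR_cons]

-- ===== B side =====

-- the cut positions relative to a list preceded by the label prev
def pvCutsP (prev : String) (ls : List String) : List Nat :=
  (List.range ls.length).filter (fun j => !(ls[j]? == (if j = 0 then some prev else ls[j - 1]?)))

def pvPairs (ls : List String) (cuts : List Nat) : List (String × Int) :=
  (cuts.zip cuts.tail).map (fun p => (ls.getD p.1 "", (p.2 : Int) - (p.1 : Int)))

-- the shifted cut condition of a cons list is the relative cut condition with prev = head
theorem pvShiftFun (l : String) (rest : List String) (j : Nat) :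
    ((j + 1 : Nat) == 0 || (l :: rest)[j + 1]? != (l :: rest)[j + 1 - 1]?) =
      !(rest[j]? == (if j = 0 then some l else rest[j - 1]?)) := by
  cases j with
  | zero => simp [bne]
  | succ k => simp [bne]

theorem pvCuts_cons (l : String) (rest : List String) :
    (List.range (l :: rest).length).filter
        (fun i => i == 0 || (l :: rest)[i]? != (l :: rest)[i - 1]?) =
      0 :: (pvCutsP l rest).map (· + 1) := by
  rw [List.length_cons, List.range_succ_eq_map,
    List.filter_cons_of_pos (by simp), List.filter_map]
  unfold pvCutsP
  congr 1
  rw [show ((fun i => i == 0 || (l :: rest)[i]? != (l :: rest)[i - 1]?) ∘ Nat.succ) =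
        (fun j => !(rest[j]? == (if j = 0 then some l else rest[j - 1]?))) from
      funext fun j => pvShiftFun l rest j]

theorem pvShiftFunP (prev l : String) (rest : List String) (j : Nat) :
    (!((l :: rest)[j + 1]? == (if j + 1 = 0 then some prev else (l :: rest)[j + 1 - 1]?))) =
      !(rest[j]? == (if j = 0 then some l else rest[j - 1]?)) := by
  cases j with
  | zero => simp
  | succ k => simp

theorem pvCutsP_cons (prev l : String) (rest : List String) :
    pvCutsP prev (l :: rest) =
      (if l = prev then [] else [0]) ++ (pvCutsP l rest).map (· + 1) := by
  unfold pvCutsP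
  rw [List.length_cons, List.range_succ_eq_map, List.filter_cons, List.filter_map]
  rw [show ((fun j => !((l :: rest)[j]? == (if j = 0 then some prev else (l :: rest)[j - 1]?))) ∘ Nat.succ) =
        (fun j => !(rest[j]? == (if j = 0 then some l else rest[j - 1]?))) from
      funext fun j => pvShiftFunP prev l rest j]
  by_cases hlp : l = prev
  · simp [hlp]
  · simp [hlp]

theorem pvPairs_shift (x : String) (ls : List String) (cuts : List Nat) :
    pvPairs (x :: ls) (cuts.map (· + 1)) = pvPairs ls cuts := by
  unfold pvPairs
  rw [show (cuts.map (· + 1)).tail = cuts.tail.map (· + 1) from by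
        cases cuts <;> simp,
      List.zip_map, List.map_map]
  refine List.map_congr_left fun p _ => ?_
  obtain ⟨a, b⟩ := p
  refine Prod.ext rfl ?_
  simp only [Prod.map, Function.comp]
  push_cast
  ring

theorem pvPairs_cons (ls : List String) (a b : Nat) (cs : List Nat) :
    pvPairs ls (a :: b :: cs) =
      (ls.getD a "", (b : Int) - (a : Int)) :: pvPairs ls (b :: cs) := by
  simp [pvPairs]

theorem pvPairs_main (ls : List String) : ∀ (prev : String),
    pvPairs (prev :: ls) (0 :: (pvCutsP prev ls).map (· + 1) ++ [ls.length + 1]) =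
      pvR (prev :: ls) := by
  induction ls with
  | nil => intro prev; simp [pvCutsP, pvPairs, pvR]
  | cons l rest ih =>
    intro prev
    rw [pvCutsP_cons]
    simp only [List.cons_append] at ih ⊢
    have hIH0 := ih l
    obtain ⟨d, D', hDd⟩ : ∃ d D',
        (pvCutsP l rest).map (· + 1) ++ [rest.length + 1] = d :: D' := by
      cases h : (pvCutsP l rest).map (· + 1) with
      | nil => exact ⟨rest.length + 1, [], by simp⟩
      | cons a t => exact ⟨a, t ++ [rest.length + 1], by simp⟩
    have h2 : ((pvCutsP l rest).map (· + 1)).map (· + 1) ++ [rest.length + 1 + 1] =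
        ((pvCutsP l rest).map (· + 1) ++ [rest.length + 1]).map (· + 1) := by
      simp
    have hIH := hIH0
    rw [hDd, pvPairs_cons] at hIH
    by_cases hlp : l = prev
    · subst hlp
      rw [if_pos rfl, List.nil_append, List.length_cons]
      rw [show (0 : Nat) :: (((pvCutsP l rest).map (· + 1)).map (· + 1) ++ [rest.length + 1 + 1]) =
            0 :: (d + 1) :: D'.map (· + 1) from by
          rw [h2, hDd]; rfl]
      rw [pvPairs_cons]
      have htail : pvPairs (l :: l :: rest) ((d + 1) :: D'.map (· + 1)) =
          pvPairs (l :: rest) (d :: D') := by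
        have h3 := pvPairs_shift l (l :: rest) (d :: D')
        simpa using h3
      rw [htail]
      rw [show pvR (l :: l :: rest) =
            (match pvR (l :: rest) with
             | (x, m) :: r => (x, m + 1) :: r
             | [] => []) from by simp [pvR]]
      rw [← hIH]
      refine congrArg (fun z => z :: pvPairs (l :: rest) (d :: D')) ?_
      refine Prod.ext rfl ?_
      push_cast
      ring
    · rw [if_neg hlp, List.length_cons]
      simp only [List.map_cons, List.nil_append, List.cons_append]
      rw [h2, pvPairs_cons]
      have h3 := pvPairs_shift prev (l :: rest)
        (0 :: ((pvCutsP l rest).map (· + 1) ++ [rest.length + 1]))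
      simp only [List.map_cons] at h3
      rw [h3, hIH0]
      rw [show pvR (prev :: l :: rest) = (prev, 1) :: pvR (l :: rest) from by
            simp [pvR, Ne.symm hlp]]
      norm_num

theorem pvFmt_pvPairs (ls : List String) (cuts : List Nat) :
    (cuts.zip cuts.tail).map
        (fun p => ls.getD p.1 "" ++ PySem.Int.toStr ((p.2 : Int) - (p.1 : Int))) =
      pvFmt (pvPairs ls cuts) := by
  simp [pvFmt, pvPairs, List.map_map, Function.comp]

theorem get_pattern_alt_eq_R (password : String) :
    get_pattern_alt password = pvFmt (pvR (password.toList.map pvLabel)) := by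
  unfold get_pattern_alt
  rcases h : password.toList with _ | ⟨c, cs⟩
  · rfl
  · rw [pvFmt_pvPairs, List.map_cons, pvCuts_cons, List.length_cons, List.length_map]
    rw [show ((0 : Nat) :: (pvCutsP (pvLabel c) (cs.map pvLabel)).map (· + 1)) ++ [cs.length + 1] =
          0 :: (pvCutsP (pvLabel c) (cs.map pvLabel)).map (· + 1) ++ [(cs.map pvLabel).length + 1] from by
        simp]
    rw [pvPairs_main]

-- ===== VERDICT (by name: the statement is the Claim_ definition above) =====
theorem get_pattern_spec : Claim_equal_get_pattern := by
  intro password _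
  unfold Spec_get_pattern
  rw [get_pattern_eq_R, get_pattern_alt_eq_R]
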